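-- pv_equiv track=rewrite | github.com/osilkin98/HappyMail | data_statistics.py | create_length_map
-- ===== SOURCE A (Python) =====
-- def create_length_map(data):
--     length_map = {}
--
--     for message in data:
--         if len(message) in length_map:
--             length_map[len(message)] += 1
--         else:
--             length_map[len(message)] = 1
--
--     return length_map
-- ===== SOURCE B (Python) =====
-- def _go(lengths):
--     # Partition-style recursion: take the first length, drop all of its
--     # occurrences in one filter, derive its count from the length difference,
--     # and recurse on the residue.  First-occurrence order is preserved.
--     if not lengths:
--         return {}
--     first = lengths[0]
--     rest = [x for x in lengths if x != first]
--     result = {first: len(lengths) - len(rest)}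
--     result.update(_go(rest))
--     return result
--
--
-- def create_length_map(data):
--     return _go([len(m) for m in data])
-- ===== Notes on version B (the rewrite author's own statement) =====
-- stated objective: alternative
-- what changed: Replaces the single-pass hash accumulation (membership test, increment-or-initialize per element) with a partition-based recursion: repeatedly take the first length, remove all its occurrences with one filter, obtain its count as the length difference, and recurse on the residue.
import Mathlib
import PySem

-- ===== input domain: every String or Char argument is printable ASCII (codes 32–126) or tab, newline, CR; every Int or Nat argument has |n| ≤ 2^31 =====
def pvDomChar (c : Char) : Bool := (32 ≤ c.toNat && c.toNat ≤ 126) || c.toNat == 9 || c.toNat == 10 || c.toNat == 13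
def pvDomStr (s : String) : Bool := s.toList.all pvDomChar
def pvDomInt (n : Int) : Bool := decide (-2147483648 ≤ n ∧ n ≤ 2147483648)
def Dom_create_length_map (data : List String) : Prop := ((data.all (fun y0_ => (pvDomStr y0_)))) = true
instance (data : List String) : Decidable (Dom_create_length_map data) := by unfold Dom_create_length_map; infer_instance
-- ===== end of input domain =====

-- B replaces A's single-pass increment-or-initialize dict loop with a partition-based
-- recursion (remove all occurrences of the first length per step); alternative structure,
-- same exact result.

-- ===== PORT A =====
-- literal port of A: one pass, increment an existing key else initialize it to 1
def create_length_map (data : List String) : List (Int × Int) :=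
  (data.foldl
    (fun (length_map : PySem.Dict Int Int) (message : String) =>
      if length_map.contains (PySem.Str.len message) then
        length_map.insert (PySem.Str.len message)
          (length_map.getD (PySem.Str.len message) 0 + 1)
      else
        length_map.insert (PySem.Str.len message) 1)
    PySem.Dict.empty).items

-- ===== PORT B =====
-- port of Source B's _go: partition recursion on the list of lengths.
-- {first: cnt} followed by result.update(_go(rest)) is a cons, exact here because every
-- key produced by the recursive call comes from rest, whose elements all differ from first.
def pvGo : List Int → List (Int × Int)
  | [] => []
  | first :: t =>
      let rest := (first :: t).filter (fun x => decide (x ≠ first))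
      (first, ((first :: t).length : Int) - (rest.length : Int)) :: pvGo rest
  termination_by ls => ls.length
  decreasing_by
    simp only [List.filter_cons, decide_not, ne_eq, decide_true, Bool.not_true, Bool.false_eq_true,
      if_false, List.length_cons]
    exact Nat.lt_succ_of_le (List.length_filter_le _ _)

def create_length_map_alt (data : List String) : List (Int × Int) :=
  pvGo (data.map PySem.Str.len)

-- ===== PRECONDITION & SPEC =====
def Spec_create_length_map (data : List String) (out : List (Int × Int)) : Prop := out = create_length_map_alt data
instance (data : List String) (out : List (Int × Int)) : Decidable (Spec_create_length_map data out) := by unfold Spec_create_length_map; infer_instance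

-- ===== CLAIM (what is proved, stated in full; the proofs are below) =====
def Claim_equal_create_length_map : Prop := ∀ (data : List String), Dom_create_length_map data → Spec_create_length_map data (create_length_map data)

-- ===== LEMMAS AND PROOFS =====

-- A's loop body is, on every dict, the canonical counter step: when the key is absent
-- getD gives the default 0, so 'insert k 1' is 'insert k (getD k 0 + 1)'.
theorem step_eq_counter_step (d : PySem.Dict Int Int) (k : Int) :
    (if d.contains k then d.insert k (d.getD k 0 + 1) else d.insert k 1)
      = d.insert k (d.getD k 0 + 1) := by
  cases h : d.contains k
  · have hget : d.get? k = none := (PySem.Dict.get?_eq_none_iff_contains d k).mpr h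
    simp [PySem.Dict.getD, hget]
  · simp

-- folding Set.add over a list skips occurrences of a value already in the accumulator
theorem foldl_add_skip (L : Int) : ∀ (ls acc : List Int), L ∈ acc →
    ls.foldl PySem.Set.add acc = (ls.filter (fun x => decide (x ≠ L))).foldl PySem.Set.add acc := by
  intro ls
  induction ls with
  | nil => intro acc _; rfl
  | cons x t ih =>
    intro acc hL
    by_cases hx : x = L
    · subst hx
      have hadd : PySem.Set.add acc x = acc := by
        simp [PySem.Set.add, PySem.Set.contains, hL]
      simp [hadd, ih acc hL]
    · have hmem : L ∈ PySem.Set.add acc x := by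
        unfold PySem.Set.add; split
        · exact hL
        · exact List.mem_append_left _ hL
      simp [hx, List.foldl_cons, ih (PySem.Set.add acc x) hmem]

-- a value absent from the list floats out of the accumulator of the Set.ofList fold
theorem foldl_add_cons_notmem (L : Int) : ∀ (ls acc : List Int), L ∉ ls →
    ls.foldl PySem.Set.add (L :: acc) = L :: ls.foldl PySem.Set.add acc := by
  intro ls
  induction ls with
  | nil => intro acc _; rfl
  | cons x t ih =>
    intro acc hL
    have hxL : x ≠ L := fun h => hL (by simp [h])
    have hcontains : PySem.Set.contains (L :: acc) x = PySem.Set.contains acc x := by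
      simp [PySem.Set.contains, hxL]
    have hadd : PySem.Set.add (L :: acc) x = L :: PySem.Set.add acc x := by
      unfold PySem.Set.add
      rw [hcontains]; split
      · rfl
      · rfl
    simp only [List.foldl_cons, hadd]
    exact ih _ (fun h => hL (List.mem_cons_of_mem _ h))

-- ordered dedup peels its head: the first element, then the dedup of the residue
theorem dedup_cons_eq (L : Int) (t : List Int) :
    PySem.List.dedup (L :: t)
      = L :: PySem.List.dedup (t.filter (fun x => decide (x ≠ L))) := by
  have h1 : PySem.List.dedup (L :: t) = t.foldl PySem.Set.add [L] := by
    simp [PySem.List.dedup, PySem.Set.ofList, PySem.Set.empty, PySem.Set.add, PySem.Set.contains]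
  have hnot : L ∉ t.filter (fun x => decide (x ≠ L)) := by
    intro h
    have := List.of_mem_filter h
    simp at this
  rw [h1, foldl_add_skip L t [L] (by simp)]
  rw [show ([L] : List Int) = L :: ([] : List Int) from rfl,
    foldl_add_cons_notmem L _ [] hnot]
  rfl

-- pvGo computes exactly Counter-as-items: distinct lengths in first-occurrence order,
-- each paired with its multiplicity in the whole list
theorem pvGo_eq_dedup_count : ∀ (ls : List Int),
    pvGo ls = (PySem.List.dedup ls).map (fun k => (k, (ls.count k : Int))) := by
  intro ls
  induction ls using pvGo.induct with
  | case1 => simp [pvGo]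
  | case2 first t rest ih =>
    have hrest : rest = t.filter (fun x => decide (x ≠ first)) := by
      simp [rest]
    rw [pvGo, dedup_cons_eq, List.map_cons]
    refine congrArg₂ _ ?_ ?_
    · -- head: the count of `first` is the removed length difference
      have hsplit : (first :: t).length
          = ((first :: t).filter (fun x => decide (x ≠ first))).length
            + (first :: t).count first := by
        rw [← List.countP_eq_length_filter, List.count_eq_countP,
          List.length_eq_countP_add_countP (p := fun x => decide (x ≠ first)) (l := first :: t)]
        congr 1
        apply List.countP_congr
        intro x _
        by_cases h : x = first <;> simp [h]
      have : (rest.length : Int) + ((first :: t).count first : Int) = ((first :: t).length : Int) := by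
        rw [hsplit]; push_cast; ring
      refine Prod.ext rfl ?_
      simp only []
      omega
    · -- tail: counts over the residue agree with counts over the full list off `first`
      rw [ih, ← hrest]
      apply List.map_congr_left
      intro k hk
      have hkrest : k ∈ rest := by
        exact (PySem.List.mem_dedup rest k).mp hk
      have hkne : k ≠ first := by
        rw [hrest] at hkrest
        have := List.of_mem_filter hkrest
        simpa using this
      have : rest.count k = (first :: t).count k := by
        rw [hrest, List.count_filter (by simp [hkne])]
        exact (List.count_cons_of_ne hkne.symm).symm
      rw [this]

-- ===== VERDICT (by name: the statement is the Claim_ definition above) =====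
theorem create_length_map_spec : Claim_equal_create_length_map := by
  intro data _
  show create_length_map data = create_length_map_alt data
  unfold create_length_map create_length_map_alt
  have h1 : data.foldl
      (fun (length_map : PySem.Dict Int Int) (message : String) =>
        if length_map.contains (PySem.Str.len message) then
          length_map.insert (PySem.Str.len message)
            (length_map.getD (PySem.Str.len message) 0 + 1)
        else
          length_map.insert (PySem.Str.len message) 1)
      PySem.Dict.empty
      = (data.map PySem.Str.len).foldl
          (fun d k => d.insert k (d.getD k 0 + 1)) PySem.Dict.empty := by
    rw [List.foldl_map]
    exact PySem.List.foldl_congr_mem data _ _ _ (fun d m _ => step_eq_counter_step d (PySem.Str.len m))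
  rw [h1, PySem.Dict.foldl_insert_getD_add_one_eq_counter, PySem.Dict.items_counter,
    pvGo_eq_dedup_count]
  simp
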